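-- pv_equiv track=rewrite | github.com/Zahrannnn/wasla-models | app/shared/auth.py | strip_bearer_prefix
-- ===== SOURCE A (Python) =====
-- def strip_bearer_prefix(value: str | None) -> str | None:
--     """
--     Return the JWT/credential string without a leading ``Bearer `` prefix.
--
--     Swagger's **Authorize** dialog for HTTP Bearer usually expects **only** the
--     token; if someone pastes ``Bearer eyJ...`` anyway, FastAPI still forwards that
--     whole string as ``credentials``, and we would otherwise emit
--     ``Authorization: Bearer Bearer eyJ...`` to the CRM.
--     """
--     if not value:
--         return None
--     t = value.strip()
--     while True:
--         lower = t.lower()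
--         if lower.startswith("bearer "):
--             t = t[7:].strip()
--             continue
--         break
--     return t or None
-- ===== SOURCE B (Python) =====
-- def strip_bearer_prefix(value):
--     """Single forward scan with an index cursor: no repeated slicing,
--     re-lowercasing or re-stripping of the remaining string."""
--     if not value:
--         return None
--     t = value.strip()
--     i = 0
--     n = len(t)
--     while t[i:i + 7].lower() == "bearer ":
--         i += 7
--         while i < n and t[i].isspace():
--             i += 1
--     rest = t[i:]
--     return rest if rest else None
-- ===== Notes on version B (the rewrite author's own statement) =====
-- stated objective: alternative
-- what changed: Replaces A's while-True loop that each pass lowercases the whole remaining string and rebuilds it via t[7:].strip() with a single forward scan using an integer cursor that lowercases only a 7-char window and skips whitespace character by character, slicing the string once at the end.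
import Mathlib
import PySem

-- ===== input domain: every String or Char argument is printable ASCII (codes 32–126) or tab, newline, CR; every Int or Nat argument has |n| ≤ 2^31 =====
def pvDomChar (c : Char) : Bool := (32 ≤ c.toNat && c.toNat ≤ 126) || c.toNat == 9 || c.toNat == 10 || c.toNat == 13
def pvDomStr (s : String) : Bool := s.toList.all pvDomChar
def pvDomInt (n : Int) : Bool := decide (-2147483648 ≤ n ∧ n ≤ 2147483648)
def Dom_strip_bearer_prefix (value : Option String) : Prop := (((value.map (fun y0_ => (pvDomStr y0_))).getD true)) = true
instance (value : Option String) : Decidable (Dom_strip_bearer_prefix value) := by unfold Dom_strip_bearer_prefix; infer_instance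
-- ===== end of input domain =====

-- B replaces A's while-True loop (which re-lowercases and rebuilds the remaining string each
-- pass) with a single forward cursor scan; the return value is proved identical on all inputs.


-- ===== PORT A =====
-- termination helper for both loop ports: .strip() / dropWhile never lengthen a string
lemma strip_length_le (l : List Char) : (PySem.Chars.strip l).length ≤ l.length := by
  simp only [PySem.Chars.strip, PySem.Chars.rstrip, PySem.Chars.lstrip, List.length_reverse]
  exact le_trans (List.length_dropWhile_le _ _)
    (by simpa using List.length_dropWhile_le PySem.Chars.isspace l)

-- the `while True:` loop of A: lower the whole remaining string, test startswith "bearer ",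
-- on a hit replace t by t[7:].strip() and continue, else break
def stripLoopA (t : List Char) : List Char :=
  if PySem.Chars.startswith (PySem.Chars.lower t) ['b','e','a','r','e','r',' '] then
    stripLoopA (PySem.Chars.strip (PySem.Chars.slice t (some 7)))
  else t
termination_by t.length
decreasing_by
  rename_i h
  have hpre : ['b','e','a','r','e','r',' '] <+: PySem.Chars.lower t := by
    simpa [PySem.Chars.startswith, List.isPrefixOf_iff_prefix] using h
  have h7 : 7 ≤ t.length := by
    have := hpre.length_le
    simpa [PySem.Chars.lower] using this
  have hs : PySem.Chars.slice t (some 7) = t.drop 7 := by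
    simpa using PySem.List.slice_from t (a := 7) (by norm_num)
  rw [hs]
  have hlen := strip_length_le (t.drop 7)
  simp only [List.length_drop] at hlen
  omega

def strip_bearer_prefix (value : Option String) : Option String :=
  match value with
  | none => none                                   -- `if not value: return None` (None case)
  | some v =>
    if v = "" then none                            -- `if not value: return None` (empty string)
    else
      let t := stripLoopA (PySem.Chars.strip v.toList)   -- t = value.strip(); while-loop
      if t = [] then none else some (String.ofList t)    -- `return t or None`

-- ===== PORT B =====
-- B's cursor scan, on the suffix t[i:] (t is never mutated, so the cursor i is carried as the
-- remaining suffix): compare the lowered 7-char window, then skip whitespace char by char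
def loopB (t : List Char) : List Char :=
  if PySem.Chars.lower (t.take 7) = ['b','e','a','r','e','r',' '] then   -- t[i:i+7].lower() == "bearer "
    loopB ((t.drop 7).dropWhile PySem.Chars.isspace)                     -- i += 7; skip isspace chars
  else t
termination_by t.length
decreasing_by
  rename_i h
  have h7 : 7 ≤ t.length := by
    have := congrArg List.length h
    simp [PySem.Chars.lower] at this
    omega
  have := List.length_dropWhile_le PySem.Chars.isspace (t.drop 7)
  simp at this
  omega

def strip_bearer_prefix_alt (value : Option String) : Option String :=
  match value with
  | none => none
  | some v =>
    if v = "" then none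
    else
      let rest := loopB (PySem.Chars.strip v.toList)     -- t = value.strip(); cursor scan; rest = t[i:]
      if rest = [] then none else some (String.ofList rest)   -- `return rest if rest else None`

-- ===== PRECONDITION & SPEC =====
def Spec_strip_bearer_prefix (value : Option String) (out : Option String) : Prop := out = strip_bearer_prefix_alt value
instance (value : Option String) (out : Option String) : Decidable (Spec_strip_bearer_prefix value out) := by unfold Spec_strip_bearer_prefix; infer_instance

-- ===== CLAIM (what is proved, stated in full; the proofs are below) =====
def Claim_equal_strip_bearer_prefix : Prop := ∀ (value : Option String), Dom_strip_bearer_prefix value → Spec_strip_bearer_prefix value (strip_bearer_prefix value)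

-- ===== LEMMAS AND PROOFS =====

-- a suffix of a string with no trailing whitespace has no trailing whitespace
lemma rstrip_of_suffix (l t : List Char) (hs : l <:+ t)
    (ht : PySem.Chars.rstrip t = t) : PySem.Chars.rstrip l = l := by
  have hp : l.reverse <+: t.reverse := List.reverse_prefix.mpr hs
  have ht' : List.dropWhile PySem.Chars.isspace t.reverse = t.reverse := by
    have := congrArg List.reverse ht
    simpa [PySem.Chars.rstrip] using this
  have hl : List.dropWhile PySem.Chars.isspace l.reverse = l.reverse := by
    rw [List.dropWhile_eq_self_iff] at ht' ⊢
    intro hl0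
    have hlen : 0 < t.reverse.length := lt_of_lt_of_le hl0 hp.length_le
    have hhead : l.reverse[0] = t.reverse[0] := hp.getElem (by omega)
    rw [hhead]; exact ht' hlen
  have := congrArg List.reverse hl
  simpa [PySem.Chars.rstrip] using this

lemma rstrip_strip (l : List Char) :
    PySem.Chars.rstrip (PySem.Chars.strip l) = PySem.Chars.strip l := by
  simp [PySem.Chars.strip, PySem.Chars.rstrip, List.dropWhile_idempotent]

-- the two loop conditions agree
lemma cond_eq (t : List Char) :
    PySem.Chars.startswith (PySem.Chars.lower t) ['b','e','a','r','e','r',' ']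
      = (PySem.Chars.lower (t.take 7) == ['b','e','a','r','e','r',' ']) := by
  simp only [PySem.Chars.startswith, PySem.Chars.lower, List.map_take]
  rw [Bool.eq_iff_iff]
  simp only [List.isPrefixOf_iff_prefix, beq_iff_eq]
  rw [List.prefix_iff_eq_take]
  simp only [List.length_cons, List.length_nil]
  exact eq_comm

-- on inputs with no trailing whitespace the two loops return the same string
lemma loop_eq (t : List Char) (ht : PySem.Chars.rstrip t = t) :
    stripLoopA t = loopB t := by
  induction hn : t.length using Nat.strong_induction_on generalizing t with
  | _ n ih =>
  subst hn
  rw [stripLoopA.eq_def, loopB.eq_def, cond_eq t]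
  by_cases hc : PySem.Chars.lower (t.take 7) = ['b','e','a','r','e','r',' ']
  · simp only [hc, beq_self_eq_true, if_true]
    have h7 : 7 ≤ t.length := by
      have := congrArg List.length hc
      simp [PySem.Chars.lower] at this
      omega
    have hs : PySem.Chars.slice t (some 7) = t.drop 7 := by
      simpa using PySem.List.slice_from t (a := 7) (by norm_num)
    -- t.drop 7 and its lstrip are suffixes of t, hence already right-stripped
    have hd : PySem.Chars.rstrip (t.drop 7) = t.drop 7 :=
      rstrip_of_suffix _ _ (List.drop_suffix 7 t) ht
    have harg : ((t.drop 7).dropWhile PySem.Chars.isspace) <:+ t :=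
      (List.dropWhile_suffix _).trans (List.drop_suffix 7 t)
    have hargr : PySem.Chars.rstrip ((t.drop 7).dropWhile PySem.Chars.isspace)
        = (t.drop 7).dropWhile PySem.Chars.isspace := rstrip_of_suffix _ _ harg ht
    have hstrip : PySem.Chars.strip (t.drop 7) = (t.drop 7).dropWhile PySem.Chars.isspace := by
      simp only [PySem.Chars.strip, PySem.Chars.lstrip]
      exact hargr
    rw [hs, hstrip]
    have hlt : ((t.drop 7).dropWhile PySem.Chars.isspace).length < t.length := by
      have := List.length_dropWhile_le PySem.Chars.isspace (t.drop 7)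
      simp at this
      omega
    exact ih _ hlt _ hargr rfl
  · simp [hc]

-- ===== VERDICT (by name: the statement is the Claim_ definition above) =====
theorem strip_bearer_prefix_spec : Claim_equal_strip_bearer_prefix := by
  intro value _
  unfold Spec_strip_bearer_prefix
  match value with
  | none => rfl
  | some v =>
    simp only [strip_bearer_prefix, strip_bearer_prefix_alt]
    by_cases hv : v = ""
    · simp [hv]
    · simp only [hv, if_false]
      rw [loop_eq (PySem.Chars.strip v.toList) (rstrip_strip v.toList)]
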